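-- pv_equiv track=rewrite | github.com/jsheng0901/leetcode | OA/Amazon/maximize_total_area_of_rectangles.py | getMaxTotalArea
-- ===== SOURCE A (Python) =====
-- from typing import List
--
-- def getMaxTotalArea(sideLengths: List[int]) -> int:
--     """
--     Time (n * log(n))
--     Space O(1)
--     从思路1可以看出来，大顶堆存在的意义是保证计算面积的时候是从大到小的弹出两条边，然后计算面积和保证最大。其实sort后每次找到的边一定是
--     从大到小的顺序，那么我们完全可以用两个指针来记录每次找到的两组变成，然后计算面积和，同时更新指针。
--     """
--     # 从大到小排列
--     sideLengths.sort(reverse=True)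
--     i = 0
--     max_area = 0
--     # 指针1，记录长
--     length = 0
--     # 指针2，记录宽
--     breadth = 0
--     while i < len(sideLengths) - 1:
--         # 情况1，可以和下一条边构成一对
--         if sideLengths[i] == sideLengths[i + 1]:
--             # 如果长是空的，指针赋值
--             if length == 0:
--                 length = sideLengths[i]
--             # 如果宽是空的，指针赋值
--             elif breadth == 0:
--                 breadth = sideLengths[i]
--             i += 2
--         # 情况2，减1后可以和下一条边构成一对
--         elif sideLengths[i] - sideLengths[i + 1] == 1:
--             # 如果长是空的，指针赋值
--             if length == 0:
--                 length = sideLengths[i + 1]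
--             # 如果宽是空的，指针赋值
--             elif breadth == 0:
--                 breadth = sideLengths[i + 1]
--             i += 2
--         # 情况3，不能构成一对，跳过
--         else:
--             i += 1
--
--         # 在这里更新面积和重新初始化指针的值，当长宽都找到的时候，说明可以计算面积了
--         if length != 0 and breadth != 0:
--             # 累加面积和
--             max_area += length * breadth
--             # 重新初始化指针值
--             length = 0
--             breadth = 0
--
--     return max_area % (10 ** 9 + 7)
-- ===== SOURCE B (Python) =====
-- def getMaxTotalArea(sideLengths):
--     # Mutates its argument in place (descending sort), like the original.
--     sideLengths.sort(reverse=True)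
--     # Run-length encode the sorted values.
--     runs = []
--     i = 0
--     n = len(sideLengths)
--     while i < n:
--         j = i
--         while j < n and sideLengths[j] == sideLengths[i]:
--             j += 1
--         runs.append((sideLengths[i], j - i))
--         i = j
--     # Pair sides by arithmetic on the run counts: a run of k copies of v yields
--     # k//2 edges of v; an odd leftover pairs with the next run's value when it
--     # is exactly one smaller (borrowing one element from that run).
--     # A zero-length side forms no rectangle, so zero edges are not collected.
--     edges = []
--     borrow = 0
--     for idx in range(len(runs)):
--         v, k = runs[idx]
--         k -= borrow
--         borrow = 0
--         if v != 0:
--             edges += [v] * (k // 2)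
--         if k % 2 == 1 and idx + 1 < len(runs) and v - runs[idx + 1][0] == 1:
--             w = runs[idx + 1][0]
--             if w != 0:
--                 edges.append(w)
--             borrow = 1
--     # Multiply consecutive collected edges pairwise.
--     total = 0
--     for j in range(1, len(edges), 2):
--         total += edges[j - 1] * edges[j]
--     return total % (10 ** 9 + 7)
-- ===== Notes on version B (the rewrite author's own statement) =====
-- stated objective: alternative
-- what changed: Replaces A's element-by-element two-pointer scan with its length/breadth toggle state machine by a run-length encoding of the sorted values followed by count arithmetic (k//2 edges per run, a borrow flag for an odd leftover pairing with the next run) and a final pairwise-product pass.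
import Mathlib
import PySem

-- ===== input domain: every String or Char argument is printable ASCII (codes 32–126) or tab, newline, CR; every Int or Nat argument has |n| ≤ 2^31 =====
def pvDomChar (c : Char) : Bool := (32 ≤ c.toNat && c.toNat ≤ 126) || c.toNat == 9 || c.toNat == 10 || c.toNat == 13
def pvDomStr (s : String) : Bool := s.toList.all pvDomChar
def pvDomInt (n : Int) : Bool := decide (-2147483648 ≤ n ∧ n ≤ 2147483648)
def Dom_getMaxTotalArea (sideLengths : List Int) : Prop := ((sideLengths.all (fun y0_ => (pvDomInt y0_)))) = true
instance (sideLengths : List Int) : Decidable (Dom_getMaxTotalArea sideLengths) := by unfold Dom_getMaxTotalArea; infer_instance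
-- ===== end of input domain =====

-- B replaces A's element-by-element two-pointer scan with its length/breadth toggle state
-- machine by run-length encoding of the sorted values plus count arithmetic (k//2 edges per
-- run, a borrow for an odd leftover pairing with the next run) and a pairwise-product pass.
-- A sorts its argument in place; the equivalence proved here is about the RETURN value
-- (B performs the same in-place sort in Python).

-- ===== PORT A =====
-- the while loop of A: state (remaining suffix of the sorted list, length, breadth, max_area)
def pvLoopA : List Int → Int → Int → Int → Int
  | x :: y :: rest, length, breadth, acc =>
    if x = y then
      let l := if length = 0 then x else length
      let b := if length = 0 then breadth else if breadth = 0 then x else breadth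
      if l ≠ 0 ∧ b ≠ 0 then pvLoopA rest 0 0 (acc + l * b) else pvLoopA rest l b acc
    else if x - y = 1 then
      let l := if length = 0 then y else length
      let b := if length = 0 then breadth else if breadth = 0 then y else breadth
      if l ≠ 0 ∧ b ≠ 0 then pvLoopA rest 0 0 (acc + l * b) else pvLoopA rest l b acc
    else
      if length ≠ 0 ∧ breadth ≠ 0 then pvLoopA (y :: rest) 0 0 (acc + length * breadth)
      else pvLoopA (y :: rest) length breadth acc
  | [], _, _, acc => acc
  | [_], _, _, acc => acc
termination_by s _ _ _ => s.length
decreasing_by all_goals (simp; try omega)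

def getMaxTotalArea (sideLengths : List Int) : Int :=
  pvLoopA (PySem.List.sorted sideLengths (fun x => x) true) 0 0 0 |> (fun t => PySem.Int.mod t (10 ^ 9 + 7))

-- ===== PORT B =====
-- B's first loop: run-length encode (inner while = takeWhile, advance i to j = dropWhile)
def pvRLE : List Int → List (Int × Int)
  | [] => []
  | x :: xs =>
    (x, ((xs.takeWhile (· == x)).length : Int) + 1) :: pvRLE (xs.dropWhile (· == x))
termination_by l => l.length
decreasing_by
  simp only [List.length_cons]
  have := List.length_dropWhile_le (· == x) xs
  omega

-- B's second loop over the runs, carrying the borrow flag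
def pvProcess : Int → List (Int × Int) → List Int
  | _, [] => []
  | borrow, (v, k0) :: rest =>
    let k := k0 - borrow
    let e1 : List Int := if v ≠ 0 then List.replicate (PySem.Int.floordiv k 2).toNat v else []
    match rest with
    | [] => e1
    | (w, m) :: rest' =>
      if PySem.Int.mod k 2 = 1 ∧ v - w = 1 then
        e1 ++ ((if w ≠ 0 then [w] else []) ++ pvProcess 1 ((w, m) :: rest'))
      else
        e1 ++ pvProcess 0 ((w, m) :: rest')
termination_by _ l => l.length

-- B's last loop: sum of products of consecutive pairs of edges (odd tail dropped)
def pvPairSum : List Int → Int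
  | a :: b :: rest => a * b + pvPairSum rest
  | _ => 0

def getMaxTotalArea_alt (sideLengths : List Int) : Int :=
  PySem.Int.mod (pvPairSum (pvProcess 0 (pvRLE (PySem.List.sorted sideLengths (fun x => x) true)))) (10 ^ 9 + 7)

-- ===== PRECONDITION & SPEC =====
def Spec_getMaxTotalArea (sideLengths : List Int) (out : Int) : Prop := out = getMaxTotalArea_alt sideLengths
instance (sideLengths : List Int) (out : Int) : Decidable (Spec_getMaxTotalArea sideLengths out) := by unfold Spec_getMaxTotalArea; infer_instance

-- ===== CLAIM (what is proved, stated in full; the proofs are below) =====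
def Claim_equal_getMaxTotalArea : Prop := ∀ (sideLengths : List Int), Dom_getMaxTotalArea sideLengths → Spec_getMaxTotalArea sideLengths (getMaxTotalArea sideLengths)

-- ===== LEMMAS AND PROOFS =====

-- Characterization middle ground: the edges A's scan pairs up (smaller side of each matched
-- adjacent pair, zero edges skipped), used only by the proofs.
def pvCollect : List Int → List Int
  | x :: y :: rest =>
    if x = y ∨ x - y = 1 then
      (if y ≠ 0 then y :: pvCollect rest else pvCollect rest)
    else pvCollect (y :: rest)
  | _ => []
termination_by s => s.length
decreasing_by all_goals (simp; try omega)

-- Invariant for A's loop: breadth = 0 at every loop head, and the pending 'length' (if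
-- nonzero) is exactly the edge collected but not yet multiplied.
lemma pvLoopA_eq (n : Nat) : ∀ (s : List Int) (l acc : Int), s.length ≤ n →
    pvLoopA s l 0 acc = acc + pvPairSum ((if l = 0 then [] else [l]) ++ pvCollect s) := by
  induction n with
  | zero =>
    intro s l acc hs
    match s with
    | [] => split_ifs <;> simp [pvLoopA, pvCollect, pvPairSum]
    | _ :: _ => simp at hs
  | succ n ih =>
    intro s l acc hs
    match s with
    | [] => split_ifs <;> simp [pvLoopA, pvCollect, pvPairSum]
    | [x] => split_ifs <;> simp [pvLoopA, pvCollect, pvPairSum]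
    | x :: y :: rest =>
      simp only [List.length_cons] at hs
      have hr : rest.length ≤ n := by omega
      have hr1 : (y :: rest).length ≤ n := by simp; omega
      by_cases hxy : x = y
      · subst hxy
        by_cases hl : l = 0
        · subst hl
          by_cases hx : x = 0
          · subst hx
            simp only [pvLoopA, pvCollect]
            simp [ih rest 0 acc hr]
          · simp only [pvLoopA, pvCollect]
            simp only [if_pos rfl, hx, ite_true, ne_eq, not_true_eq_false, false_and, if_false,
              or_true, if_true, ite_false]
            rw [ih rest x acc hr]
            simp [hx]
        · by_cases hx : x = 0
          · subst hx
            simp only [pvLoopA, pvCollect]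
            simp only [hl, ite_false, ite_self, ne_eq, not_false_eq_true, true_and,
              not_true_eq_false, if_false, or_true, if_true, if_pos rfl]
            rw [ih rest l acc hr]
            simp [hl]
          · simp only [pvLoopA, pvCollect]
            simp only [hl, ite_false, if_pos rfl, ne_eq, hx, not_false_eq_true, and_self, if_true,
              or_true, ite_true]
            rw [ih rest 0 (acc + l * x) hr]
            simp [hl, pvPairSum]
            ring
      · by_cases hd : x - y = 1
        · by_cases hl : l = 0
          · by_cases hy : y = 0
            · subst hy
              simp only [pvLoopA, pvCollect]
              simp [hxy, hd, hl, ih rest 0 acc hr]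
            · simp only [pvLoopA, pvCollect]
              simp only [hxy, hd, hl, ite_true, ite_false, if_false, ne_eq, hy, not_false_eq_true,
                not_true_eq_false, false_and, or_true, if_true]
              rw [ih rest y acc hr]
              simp [hxy, hd, hy]
          · by_cases hy : y = 0
            · subst hy
              simp only [pvLoopA, pvCollect]
              simp only [hxy, hd, hl, ite_false, ite_self, ne_eq, not_false_eq_true, true_and,
                not_true_eq_false, if_false, or_true, if_true, ite_true]
              rw [ih rest l acc hr]
              simp [hl]
            · simp only [pvLoopA, pvCollect]
              simp only [hxy, hd, hl, ite_true, ite_false, ne_eq, hy, not_false_eq_true, and_self,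
                if_true, or_true]
              rw [ih rest 0 (acc + l * y) hr]
              simp [hl, pvPairSum]
              ring
        · simp only [pvLoopA, pvCollect]
          simp only [hxy, hd, ite_false, ne_eq, not_true_eq_false, and_false, if_false, or_self]
          rw [ih (y :: rest) l acc hr1]

-- What pvCollect does on a block of m equal values followed by a list with a different head.
lemma collect_rep : ∀ (m : Nat) (v : Int) (t : List Int), t.head? ≠ some v →
    pvCollect (List.replicate m v ++ t) =
      (if v = 0 then ([] : List Int) else List.replicate (m / 2) v) ++
      (if m % 2 = 1 then
          (match t with
           | [] => ([] : List Int)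
           | w :: t' => if v - w = 1 then (if w = 0 then ([] : List Int) else [w]) ++ pvCollect t'
                        else pvCollect (w :: t'))
        else pvCollect t) := by
  intro m
  induction m using Nat.strong_induction_on with
  | _ m ih =>
    intro v t ht
    match m with
    | 0 => simp [pvCollect]
    | 1 =>
      match t with
      | [] => simp [pvCollect]
      | w :: t' =>
        have hwv : ¬ (v = w) := by
          intro h; exact ht (by simp [h])
        simp only [List.replicate, List.nil_append, List.cons_append, List.singleton_append]
        show pvCollect (v :: w :: t') = _
        by_cases hd : v - w = 1
        · by_cases hw : w = 0
          · subst hw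
            simp [pvCollect, hwv, hd]
          · simp [pvCollect, hwv, hd, hw]
        · simp [pvCollect, hwv, hd]
    | (m + 2) =>
      have hrep : List.replicate (m + 2) v ++ t = v :: v :: (List.replicate m v ++ t) := by
        simp [List.replicate]
      rw [hrep]
      have hC : pvCollect (v :: v :: (List.replicate m v ++ t)) =
          (if v ≠ 0 then v :: pvCollect (List.replicate m v ++ t)
           else pvCollect (List.replicate m v ++ t)) := by
        simp [pvCollect]
      rw [hC, ih m (by omega) v t ht]
      have h2 : (m + 2) / 2 = m / 2 + 1 := by omega
      have h3 : (m + 2) % 2 = m % 2 := by omega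
      rw [h2, h3]
      by_cases hv : v = 0
      · simp [hv]
      · simp [hv, List.replicate]

-- One step of pvProcess on a run of m copies of x followed by the RLE of d,
-- given the inductive facts about pvProcess on pvRLE d.
lemma pvRLE_nil : pvRLE ([] : List Int) = [] := by simp [pvRLE]

lemma pvRLE_cons (w : Int) (d' : List Int) :
    pvRLE (w :: d') = (w, ((d'.takeWhile (· == w)).length : Int) + 1) :: pvRLE (d'.dropWhile (· == w)) := by
  simp [pvRLE]

lemma pvProcess_core (m : Nat) (x : Int) (d : List Int) (hd : d.head? ≠ some x)
    (ih0 : pvProcess 0 (pvRLE d) = pvCollect d)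
    (ih1 : pvProcess 1 (pvRLE d) = pvCollect d.tail)
    (b k0 : Int) (hk : k0 - b = (m : Int)) :
    pvProcess b ((x, k0) :: pvRLE d) = pvCollect (List.replicate m x ++ d) := by
  have hfd : (PySem.Int.floordiv (k0 - b) 2).toNat = m / 2 := by
    rw [hk, PySem.Int.floordiv_eq_ediv_of_pos (by norm_num)]
    omega
  have hmd : (PySem.Int.mod (k0 - b) 2 = 1) ↔ (m % 2 = 1) := by
    rw [hk, PySem.Int.mod_eq_emod_of_pos (by norm_num)]
    omega
  rw [collect_rep m x d hd]
  match d with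
  | [] =>
    rw [pvRLE_nil]
    simp only [pvProcess, hfd]
    split_ifs <;> simp_all [pvCollect]
  | w :: d' =>
    rw [pvRLE_cons]
    rw [pvRLE_cons] at ih0 ih1
    simp only [pvProcess, hfd]
    by_cases hpar : m % 2 = 1
    · by_cases hdiff : x - w = 1
      · rw [if_pos ⟨hmd.mpr hpar, hdiff⟩, ih1]
        simp only [List.tail_cons]
        simp [hpar, hdiff]
      · rw [if_neg (by intro h; exact hdiff h.2), ih0]
        simp [hpar, hdiff]
    · rw [if_neg (by intro h; exact hpar (hmd.mp h.1)), ih0]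
      simp [hpar]

-- the head of dropWhile fails the predicate
lemma dropWhile_head_false {p : Int → Bool} : ∀ (l : List Int) (w : Int) (d' : List Int),
    l.dropWhile p = w :: d' → p w = false := by
  intro l
  induction l with
  | nil => intro w d' h; simp [List.dropWhile] at h
  | cons a l ih =>
    intro w d' h
    by_cases hpa : p a = true
    · rw [List.dropWhile_cons_of_pos hpa] at h
      exact ih w d' h
    · rw [List.dropWhile_cons_of_neg hpa] at h
      cases h
      simpa using hpa

-- pvProcess over pvRLE computes exactly pvCollect (borrow 1 drops the first element).
lemma process_rle (n : Nat) : ∀ (s : List Int), s.length ≤ n →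
    pvProcess 0 (pvRLE s) = pvCollect s ∧ pvProcess 1 (pvRLE s) = pvCollect s.tail := by
  induction n with
  | zero =>
    intro s hs
    match s with
    | [] => simp [pvRLE_nil, pvProcess, pvCollect]
    | _ :: _ => simp at hs
  | succ n ih =>
    intro s hs
    match s with
    | [] => simp [pvRLE_nil, pvProcess, pvCollect]
    | x :: xs =>
      have hxs : xs.takeWhile (· == x) ++ xs.dropWhile (· == x) = xs :=
        List.takeWhile_append_dropWhile
      have htx : xs.takeWhile (· == x) = List.replicate (xs.takeWhile (· == x)).length x := by
        apply List.eq_replicate_of_mem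
        intro b hb
        have := List.mem_takeWhile_imp hb
        simpa using this
      have hdl : (xs.dropWhile (· == x)).length ≤ n := by
        have h1 := List.length_dropWhile_le (· == x) xs
        simp only [List.length_cons] at hs
        omega
      have hdhd : (xs.dropWhile (· == x)).head? ≠ some x := by
        cases hh : xs.dropWhile (· == x) with
        | nil => simp
        | cons w d' =>
          have hw := dropWhile_head_false xs w d' hh
          simp only [beq_eq_false_iff_ne, ne_eq] at hw
          simp only [List.head?_cons]
          intro hc
          exact hw (Option.some.inj hc)
      have hih := ih _ hdl
      have hs2 : xs = List.replicate (xs.takeWhile (· == x)).length x ++ xs.dropWhile (· == x) := by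
        conv_lhs => rw [← hxs, htx]
      have hs1 : x :: xs = List.replicate ((xs.takeWhile (· == x)).length + 1) x ++ xs.dropWhile (· == x) := by
        rw [List.replicate_succ, List.cons_append, ← hs2]
      constructor
      · rw [pvRLE_cons]
        conv_rhs => rw [hs1]
        exact pvProcess_core _ x _ hdhd hih.1 hih.2 0 _ (by push_cast; ring)
      · rw [pvRLE_cons]
        simp only [List.tail_cons]
        conv_rhs => rw [hs2]
        exact pvProcess_core _ x _ hdhd hih.1 hih.2 1 _ (by push_cast; ring)

-- ===== VERDICT (by name: the statement is the Claim_ definition above) =====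
theorem getMaxTotalArea_spec : Claim_equal_getMaxTotalArea := by
  intro sideLengths _
  unfold Spec_getMaxTotalArea getMaxTotalArea getMaxTotalArea_alt
  rw [pvLoopA_eq (PySem.List.sorted sideLengths (fun x => x) true).length _ 0 0 le_rfl]
  rw [(process_rle (PySem.List.sorted sideLengths (fun x => x) true).length _ le_rfl).1]
  simp
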